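-- pv_equiv track=rewrite | github.com/tmackintosh/enigma | helpers/get_rotors.py | get_rotors
-- ===== SOURCE A (Python) =====
-- import math
--
-- def get_binary(number):
--     string = ""
--
--     while number != 0:
--         if number % 2 != 0:
--             string = "1" + string
--         else:
--             string = "0" + string
--
--         number = math.floor(number / 2)
--
--     return string
--
-- def get_rotors(rotors):
--     if len(rotors) < 3:
--         return []
--
--     possible_rotors = []
--
--     for i in range (7, 2 ** (len(rotors))):
--         selection = get_binary(i)
--         rotor_combo = []
--
--         while len(selection) != len(rotors):
--             selection = "0" + selection
--
--         for j in range(0, len(selection)):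
--             if selection[j] == "1":
--                 rotor_combo.append(rotors[j])
--
--         if len(rotor_combo) != 3:
--             continue
--
--         possible_rotors.append(rotor_combo)
--
--     return possible_rotors
-- ===== SOURCE B (Python) =====
-- def _combinations(items, k):
--     """All k-element combinations of items, ordered so that combinations
--     excluding the first item come before those including it (i.e. increasing
--     bitmask order when the first item is the most significant bit)."""
--     if k == 0:
--         return [[]]
--     if len(items) < k:
--         return []
--     rest = items[1:]
--     without_head = _combinations(rest, k)
--     with_head = [[items[0]] + tail for tail in _combinations(rest, k - 1)]
--     return without_head + with_head
--
-- def get_rotors(rotors):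
--     if len(rotors) < 3:
--         return []
--     return _combinations(rotors, 3)
-- ===== Notes on version B (the rewrite author's own statement) =====
-- stated objective: faster
-- what changed: A enumerates all 2^n bitmasks, converts each to a binary string and keeps the selections with exactly 3 rotors; B generates the 3-element combinations directly by recursion on the list (combinations without the head first, then head-prefixed 2-combinations of the rest), which yields the same bitmask-ascending order without touching masks at all.
import Mathlib
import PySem

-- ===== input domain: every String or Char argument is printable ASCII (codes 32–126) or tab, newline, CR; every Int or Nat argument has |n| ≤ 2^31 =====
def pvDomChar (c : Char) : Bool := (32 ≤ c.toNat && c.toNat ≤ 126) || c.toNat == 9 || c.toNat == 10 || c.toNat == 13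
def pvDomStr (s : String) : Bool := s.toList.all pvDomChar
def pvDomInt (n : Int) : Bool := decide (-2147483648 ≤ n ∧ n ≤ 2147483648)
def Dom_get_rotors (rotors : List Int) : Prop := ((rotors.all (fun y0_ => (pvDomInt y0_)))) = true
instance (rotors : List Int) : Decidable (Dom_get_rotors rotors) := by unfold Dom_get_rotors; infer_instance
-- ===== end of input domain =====

-- B replaces A's O(2^n · n) scan over all bitmasks by a direct recursive generation
-- of the 3-element combinations in the same (bitmask-ascending) order: objective 'faster'.

-- ===== PORT A =====
-- Python string of '0'/'1' digits ported as List Char (exact: binary digits are single ASCII chars).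
-- 'while number != 0': for number < 0 Python loops forever; the 'number ≤ 0' guard only totalizes that dead branch
-- (get_rotors only calls it with number ≥ 7).
def get_binary_go (number : Int) (string : List Char) : List Char :=
  if number ≤ 0 then string
  else
    get_binary_go (PySem.Int.floordiv number 2)
      ((if PySem.Int.mod number 2 ≠ 0 then '1' else '0') :: string)
termination_by number.toNat
decreasing_by
  have h2 : PySem.Int.floordiv number 2 = number / 2 := PySem.Int.floordiv_eq_ediv_of_pos (by omega)
  omega

def get_binary (number : Int) : List Char := get_binary_go number []

-- 'while len(selection) != len(rotors): selection = "0" + selection'; for len(selection) > n Python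
-- loops forever; the 'n < length' guard only totalizes that dead branch.
def pad_loop (selection : List Char) (n : Nat) : List Char :=
  if selection.length = n then selection
  else if n < selection.length then selection
  else pad_loop ('0' :: selection) n
termination_by n - selection.length
decreasing_by simp; omega

def get_rotors (rotors : List Int) : List (List Int) :=
  if rotors.length < 3 then []
  else
    (PySem.List.pyRange 7 ((2 : Int) ^ rotors.length) 1).foldl (fun possible i =>
      let selection := pad_loop (get_binary i) rotors.length
      let combo := (PySem.List.pyRange 0 (selection.length : Int) 1).foldl (fun combo j =>
        if PySem.List.pyGetD selection j ' ' = '1' then combo ++ [PySem.List.pyGetD rotors j 0]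
        else combo) []
      if combo.length ≠ 3 then possible else possible ++ [combo]) []

-- ===== PORT B =====
-- combinations excluding the head first, then those including it (k as Nat; only called with 3)
def combosB (items : List Int) (k : Nat) : List (List Int) :=
  if k = 0 then [[]]
  else if items.length < k then []
  else
    match items with
    | [] => []   -- unreachable: items.length ≥ k > 0
    | x :: rest => combosB rest k ++ (combosB rest (k - 1)).map (fun tail => x :: tail)
termination_by items.length
decreasing_by all_goals simp

def get_rotors_alt (rotors : List Int) : List (List Int) :=
  if rotors.length < 3 then [] else combosB rotors 3

-- ===== PRECONDITION & SPEC =====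
def Spec_get_rotors (rotors : List Int) (out : List (List Int)) : Prop := out = get_rotors_alt rotors
instance (rotors : List Int) (out : List (List Int)) : Decidable (Spec_get_rotors rotors out) := by unfold Spec_get_rotors; infer_instance

-- ===== CLAIM (what is proved, stated in full; the proofs are below) =====
def Claim_equal_get_rotors : Prop := ∀ (rotors : List Int), Dom_get_rotors rotors → Spec_get_rotors rotors (get_rotors rotors)

-- ===== LEMMAS AND PROOFS =====

-- LSB-first binary digits of m, stopping at 0 (the digits get_binary produces, reversed)
def natBits (m : Nat) : List Char :=
  if m = 0 then [] else (if m % 2 = 1 then '1' else '0') :: natBits (m / 2)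
termination_by m
decreasing_by exact Nat.div_lt_self (by omega) (by omega)

-- LSB-first binary digits of m, padded/truncated to exactly n digits
def lbits : Nat → Nat → List Char
  | 0, _ => []
  | n + 1, m => (if m % 2 = 1 then '1' else '0') :: lbits n (m / 2)

-- MSB-first n-digit binary string of m
def bitstr (n m : Nat) : List Char := (lbits n m).reverse

-- elements of rs at the positions where the char is '1'
def selChars : List Char → List Int → List Int
  | c :: cs, r :: rs => (if c = '1' then [r] else []) ++ selChars cs rs
  | _, _ => []

def popcnt (m : Nat) : Nat :=
  if m = 0 then 0 else m % 2 + popcnt (m / 2)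
termination_by m
decreasing_by exact Nat.div_lt_self (by omega) (by omega)

-- the k-bit masks below 2^n, in increasing order
def combs (k n : Nat) : List Nat :=
  match k, n with
  | 0, _ => [0]
  | _ + 1, 0 => []
  | k + 1, n + 1 => combs (k + 1) n ++ (combs k n).map (fun m => 2 ^ n + m)


theorem get_binary_go_nat (m : Nat) : ∀ acc : List Char,
    get_binary_go (m : Int) acc = (natBits m).reverse ++ acc := by
  induction m using Nat.strong_induction_on with
  | _ m ih =>
    intro acc
    rw [get_binary_go, natBits]
    by_cases hm : m = 0
    · subst hm; simp
    · have h0 : ¬ ((m : Int) ≤ 0) := by omega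
      have hfd : PySem.Int.floordiv (m : Int) 2 = ((m / 2 : Nat) : Int) := by
        rw [PySem.Int.floordiv_eq_ediv_of_pos (by omega)]; omega
      have hmod : PySem.Int.mod (m : Int) 2 = ((m % 2 : Nat) : Int) := by
        rw [PySem.Int.mod_eq_emod_of_pos (by omega)]; omega
      rw [if_neg h0, hfd, hmod, ih (m / 2) (Nat.div_lt_self (by omega) (by omega))]
      have hc : ((if ((m % 2 : Nat) : Int) ≠ 0 then '1' else '0') : Char)
          = (if m % 2 = 1 then '1' else '0') := by
        by_cases hp : m % 2 = 1
        · rw [if_pos hp, if_pos (by omega)]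
        · rw [if_neg hp, if_neg (by omega)]
      rw [hc, if_neg hm]
      simp

theorem natBits_len_le (n : Nat) : ∀ m : Nat, m < 2 ^ n → (natBits m).length ≤ n := by
  induction n with
  | zero => intro m hm; interval_cases m; rw [natBits]; simp
  | succ n ih =>
    intro m hm
    rw [natBits]
    by_cases hm0 : m = 0
    · simp [hm0]
    · have h2 : 2 ^ (n + 1) = 2 * 2 ^ n := by ring
      have := ih (m / 2) (by omega)
      simp only [if_neg hm0, List.length_cons]
      omega

theorem lbits_len (n : Nat) : ∀ m : Nat, (lbits n m).length = n := by
  induction n with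
  | zero => intro m; rfl
  | succ n ih => intro m; simp [lbits, ih]

theorem lbits_zero (n : Nat) : lbits n 0 = List.replicate n '0' := by
  induction n with
  | zero => rfl
  | succ n ih => simp [lbits, ih, List.replicate_succ]

theorem lbits_eq_natBits_pad (n : Nat) : ∀ m : Nat, m < 2 ^ n →
    lbits n m = natBits m ++ List.replicate (n - (natBits m).length) '0' := by
  induction n with
  | zero => intro m hm; interval_cases m; rw [natBits]; rfl
  | succ n ih =>
    intro m hm
    by_cases hm0 : m = 0
    · subst hm0
      rw [lbits_zero, natBits]
      simp
    · have h2 : 2 ^ (n + 1) = 2 * 2 ^ n := by ring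
      have hNB : natBits m = (if m % 2 = 1 then '1' else '0') :: natBits (m / 2) := by
        conv_lhs => rw [natBits]
        rw [if_neg hm0]
      show lbits (n + 1) m = _
      rw [lbits, ih (m / 2) (by omega), hNB]
      simp

theorem pad_loop_eq (n : Nat) : ∀ cs : List Char, cs.length ≤ n →
    pad_loop cs n = List.replicate (n - cs.length) '0' ++ cs := by
  apply pad_loop.induct n (motive := fun cs => cs.length ≤ n →
      pad_loop cs n = List.replicate (n - cs.length) '0' ++ cs)
  · intro cs heq _
    rw [pad_loop, if_pos heq]; simp [heq]
  · intro cs heq hlt h; omega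
  · intro cs heq hlt ih h
    rw [pad_loop, if_neg heq, if_neg hlt, ih (by simp; omega)]
    have h1 : n - cs.length = (n - ('0' :: cs).length) + 1 := by simp; omega
    rw [h1, List.replicate_succ']
    simp

theorem pad_get_binary (n m : Nat) (h : m < 2 ^ n) :
    pad_loop (get_binary (m : Int)) n = bitstr n m := by
  have hb : get_binary (m : Int) = (natBits m).reverse := by
    rw [get_binary, get_binary_go_nat]; simp
  have hlen : (natBits m).length ≤ n := natBits_len_le n m h
  rw [hb, pad_loop_eq _ _ (by simpa using hlen), bitstr, lbits_eq_natBits_pad n m h]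
  simp

theorem selChars_replicate (n : Nat) : ∀ rs : List Int, selChars (List.replicate n '0') rs = [] := by
  induction n with
  | zero => intro rs; cases rs <;> rfl
  | succ n ih =>
    intro rs
    cases rs with
    | nil => rfl
    | cons r rs => simpa [List.replicate_succ, selChars] using ih rs

theorem lbits_succ_snoc (n : Nat) : ∀ m : Nat,
    lbits (n + 1) m = lbits n m ++ [if m / 2 ^ n % 2 = 1 then '1' else '0'] := by
  induction n with
  | zero => intro m; simp [lbits]
  | succ n ih =>
    intro m
    have e : m / 2 / 2 ^ n = m / 2 ^ (n + 1) := by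
      rw [Nat.div_div_eq_div_mul]; congr 1; ring
    calc lbits (n + 1 + 1) m
        = (if m % 2 = 1 then '1' else '0') :: lbits (n + 1) (m / 2) := rfl
      _ = (if m % 2 = 1 then '1' else '0') ::
            (lbits n (m / 2) ++ [if m / 2 / 2 ^ n % 2 = 1 then '1' else '0']) := by rw [ih]
      _ = lbits (n + 1 + 1 - 1) m ++ [if m / 2 ^ (n + 1) % 2 = 1 then '1' else '0'] := by
            rw [e]; rfl

theorem lbits_add_pow (n : Nat) : ∀ m : Nat, lbits n (2 ^ n + m) = lbits n m := by
  induction n with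
  | zero => intro m; rfl
  | succ n ih =>
    intro m
    have h2 : 2 ^ (n + 1) = 2 * 2 ^ n := by ring
    have e1 : (2 ^ (n + 1) + m) % 2 = m % 2 := by omega
    have e2 : (2 ^ (n + 1) + m) / 2 = 2 ^ n + m / 2 := by omega
    rw [lbits, lbits, e1, e2, ih]

theorem bitstr_lt (n m : Nat) (h : m < 2 ^ n) : bitstr (n + 1) m = '0' :: bitstr n m := by
  rw [bitstr, lbits_succ_snoc, Nat.div_eq_of_lt h]
  simp [bitstr]

theorem bitstr_add (n m : Nat) (h : m < 2 ^ n) : bitstr (n + 1) (2 ^ n + m) = '1' :: bitstr n m := by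
  have h1 : (2 ^ n + m) / 2 ^ n = 1 := by
    rw [Nat.add_comm, Nat.add_div_right _ (Nat.two_pow_pos n), Nat.div_eq_of_lt h]
  rw [bitstr, lbits_succ_snoc, h1, lbits_add_pow]
  simp [bitstr]

theorem popcnt_zero : popcnt 0 = 0 := by rw [popcnt]; rfl

theorem popcnt_rec (m : Nat) : popcnt m = m % 2 + popcnt (m / 2) := by
  by_cases hm : m = 0
  · subst hm; simp [popcnt_zero]
  · conv_lhs => rw [popcnt]
    rw [if_neg hm]

theorem selChars_length : ∀ (cs : List Char) (rs : List Int), cs.length = rs.length →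
    (selChars cs rs).length = cs.count '1' := by
  intro cs
  induction cs with
  | nil => intro rs h; cases rs with
    | nil => rfl
    | cons r rs => simp at h
  | cons c cs ih =>
    intro rs h
    cases rs with
    | nil => simp at h
    | cons r rs =>
      have h' : cs.length = rs.length := by simpa using h
      rw [selChars]
      by_cases hc : c = '1'
      · simp [hc, ih rs h']
      · simp [hc, ih rs h']

theorem count_lbits (n : Nat) : ∀ m : Nat, m < 2 ^ n → (lbits n m).count '1' = popcnt m := by
  induction n with
  | zero => intro m hm; interval_cases m; rw [popcnt]; rfl
  | succ n ih =>
    intro m hm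
    have h2 : 2 ^ (n + 1) = 2 * 2 ^ n := by ring
    rw [lbits, popcnt_rec m, List.count_cons, ih (m / 2) (by omega)]
    by_cases hp : m % 2 = 1
    · simp [hp]; omega
    · simp [hp]
      omega

theorem popcnt_add_pow (n : Nat) : ∀ m : Nat, m < 2 ^ n → popcnt (2 ^ n + m) = popcnt m + 1 := by
  induction n with
  | zero =>
    intro m hm; interval_cases m
    have e : (2 : Nat) ^ 0 + 0 = 1 := rfl
    rw [e, popcnt_rec 1]
    norm_num [popcnt_zero]
  | succ n ih =>
    intro m hm
    have h2 : 2 ^ (n + 1) = 2 * 2 ^ n := by ring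
    have e1 : (2 ^ (n + 1) + m) % 2 = m % 2 := by omega
    have e2 : (2 ^ (n + 1) + m) / 2 = 2 ^ n + m / 2 := by omega
    rw [popcnt_rec (2 ^ (n + 1) + m), e1, e2, ih (m / 2) (by omega), popcnt_rec m]
    omega

theorem combs_lt (k n : Nat) : ∀ m ∈ combs k n, m < 2 ^ n := by
  induction k, n using combs.induct with
  | case1 n =>
    intro m hm
    have e : combs 0 n = [0] := by cases n <;> rfl
    simp [e] at hm; subst hm; exact Nat.two_pow_pos n
  | case2 k => intro m hm; simp [show combs (k + 1) 0 = ([] : List Nat) from rfl] at hm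
  | case3 k n ih1 ih2 =>
    intro m hm
    rw [combs] at hm
    have h2 : 2 ^ (n + 1) = 2 * 2 ^ n := by ring
    rcases List.mem_append.mp hm with h | h
    · have := ih1 m h; omega
    · rcases List.mem_map.mp h with ⟨m', hm', rfl⟩
      have := ih2 m' hm'; omega

theorem combs_nil (k n : Nat) (h : n < k) : combs k n = [] := by
  induction k, n using combs.induct with
  | case1 n => omega
  | case2 k => rfl
  | case3 k n ih1 ih2 =>
    rw [combs, ih1 (by omega), ih2 (by omega)]
    rfl

theorem filter_range_popcnt (n : Nat) : ∀ k : Nat,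
    (List.range (2 ^ n)).filter (fun m => decide (popcnt m = k)) = combs k n := by
  induction n with
  | zero =>
    intro k
    cases k with
    | zero => simp [popcnt_zero, combs]
    | succ k => simp [popcnt_zero, combs]
  | succ n ih =>
    intro k
    have h2 : 2 ^ (n + 1) = 2 ^ n + 2 ^ n := by ring
    rw [h2, List.range_add, List.filter_append, List.filter_map]
    have hcong : (List.range (2 ^ n)).filter ((fun m => decide (popcnt m = k)) ∘ (fun x => 2 ^ n + x))
        = (List.range (2 ^ n)).filter (fun m => decide (popcnt m + 1 = k)) := by
      apply List.filter_congr
      intro m hm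
      have hlt : m < 2 ^ n := List.mem_range.mp hm
      simp [Function.comp, popcnt_add_pow n m hlt]
    rw [hcong]
    cases k with
    | zero =>
      have : (List.range (2 ^ n)).filter (fun m => decide (popcnt m + 1 = 0)) = [] := by
        apply List.filter_eq_nil_iff.mpr
        intro m _; simp
      rw [this, ih 0]
      simp [combs]
    | succ k =>
      have : (List.range (2 ^ n)).filter (fun m => decide (popcnt m + 1 = k + 1))
          = (List.range (2 ^ n)).filter (fun m => decide (popcnt m = k)) := by
        apply List.filter_congr
        intro m _; simp
      rw [this, ih (k + 1), ih k, combs]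

theorem inner_nat : ∀ (cs : List Char) (rs : List Int) (acc : List Int), cs.length = rs.length →
    (List.range cs.length).foldl
      (fun combo k => if cs.getD k ' ' = '1' then combo ++ [rs.getD k 0] else combo) acc
      = acc ++ selChars cs rs := by
  intro cs
  induction cs with
  | nil => intro rs acc h; simp [selChars]
  | cons c cs ih =>
    intro rs acc h
    cases rs with
    | nil => simp at h
    | cons r rs =>
      have h' : cs.length = rs.length := by simpa using h
      rw [List.length_cons, List.range_succ_eq_map, List.foldl_cons, List.foldl_map]
      simp only [List.getD_cons_zero, List.getD_cons_succ, Nat.succ_eq_add_one]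
      rw [ih rs _ h', selChars]
      by_cases hc : c = '1'
      · simp [hc]
      · simp [hc]

theorem inner_loop_eq (cs : List Char) (rs : List Int) (h : cs.length = rs.length) :
    (PySem.List.pyRange 0 (cs.length : Int) 1).foldl
      (fun combo j => if PySem.List.pyGetD cs j ' ' = '1' then combo ++ [PySem.List.pyGetD rs j 0] else combo) []
      = selChars cs rs := by
  rw [PySem.List.pyRange_one]
  have hN : ((cs.length : Int) - 0).toNat = cs.length := by omega
  rw [hN, List.foldl_map]
  have hcong := PySem.List.foldl_congr_mem (List.range cs.length)
    (fun combo k => if PySem.List.pyGetD cs ((0 : Int) + (k : Int)) ' ' = '1'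
        then combo ++ [PySem.List.pyGetD rs ((0 : Int) + (k : Int)) 0] else combo)
    (fun combo k => if cs.getD k ' ' = '1' then combo ++ [rs.getD k 0] else combo)
    ([] : List Int)
    (by
      intro acc k _
      simp only [zero_add, PySem.List.pyGetD_natCast])
  rw [hcong, inner_nat cs rs [] h]
  rfl

theorem combosB_eq (rotors : List Int) : ∀ k : Nat,
    combosB rotors k = (combs k rotors.length).map (fun m => selChars (bitstr rotors.length m) rotors) := by
  induction rotors with
  | nil =>
    intro k
    cases k with
    | zero => rw [combosB]; simp [combs, bitstr, lbits, selChars]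
    | succ k => rw [combosB]; simp [combs]
  | cons x rest ih =>
    intro k
    cases k with
    | zero =>
      rw [combosB]
      simp only [reduceIte]
      rw [combs]
      simp [bitstr, lbits_zero, selChars_replicate]
    | succ k =>
      rw [combosB]
      simp only [Nat.succ_ne_zero, reduceIte]
      by_cases hlen : (x :: rest).length < k + 1
      · rw [if_pos hlen]
        have h1 : combs (k + 1) rest.length = [] := combs_nil _ _ (by simp at hlen; omega)
        have h2 : combs k rest.length = [] := combs_nil _ _ (by simp at hlen; omega)
        rw [List.length_cons, combs, h1, h2]
        rfl
      · rw [if_neg hlen]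
        have hsimp : k + 1 - 1 = k := by omega
        rw [hsimp, ih (k + 1), ih k, List.length_cons, combs, List.map_append, List.map_map, List.map_map]
        congr 1
        · apply List.map_congr_left
          intro m hm
          have hlt : m < 2 ^ rest.length := combs_lt _ _ m hm
          rw [bitstr_lt _ _ hlt, selChars]
          simp
        · apply List.map_congr_left
          intro m hm
          have hlt : m < 2 ^ rest.length := combs_lt _ _ m hm
          simp only [Function.comp]
          rw [bitstr_add _ _ hlt, selChars]
          simp

theorem sel_length (rotors : List Int) (m : Nat) (h : m < 2 ^ rotors.length) :
    (selChars (bitstr rotors.length m) rotors).length = popcnt m := by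
  rw [selChars_length _ _ (by rw [bitstr, List.length_reverse, lbits_len])]
  rw [bitstr, List.count_reverse, count_lbits _ _ h]

theorem popcnt_lt7 (m : Nat) (h : m < 7) : popcnt m ≠ 3 := by
  have e0 := popcnt_zero
  have e1 : popcnt 1 = 1 := by rw [popcnt_rec 1]; norm_num [e0]
  have e2 : popcnt 2 = 1 := by rw [popcnt_rec 2]; norm_num [e1]
  have e3 : popcnt 3 = 2 := by rw [popcnt_rec 3]; norm_num [e1]
  have e4 : popcnt 4 = 1 := by rw [popcnt_rec 4]; norm_num [e2]
  have e5 : popcnt 5 = 2 := by rw [popcnt_rec 5]; norm_num [e2]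
  have e6 : popcnt 6 = 2 := by rw [popcnt_rec 6]; norm_num [e3]
  interval_cases m <;> omega

theorem pow_cast (n : Nat) : ((2 : Int) ^ n) = ((2 ^ n : Nat) : Int) := by push_cast; ring

theorem A_norm (rotors : List Int) (h3 : ¬ rotors.length < 3) :
    get_rotors rotors
      = ((List.range (2 ^ rotors.length - 7)).filter
          (fun k => decide (popcnt (7 + k) = 3))).map
          (fun k => selChars (bitstr rotors.length (7 + k)) rotors) := by
  have hn : 3 ≤ rotors.length := by omega
  have hN8 : 8 ≤ 2 ^ rotors.length := by
    calc (8 : Nat) = 2 ^ 3 := rfl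
      _ ≤ 2 ^ rotors.length := Nat.pow_le_pow_right (by omega) hn
  rw [get_rotors, if_neg h3]
  have hb : ∀ (acc : List (List Int)), ∀ i ∈ PySem.List.pyRange 7 ((2 : Int) ^ rotors.length) 1,
      (fun possible i =>
        let selection := pad_loop (get_binary i) rotors.length
        let combo := (PySem.List.pyRange 0 (selection.length : Int) 1).foldl (fun combo j =>
          if PySem.List.pyGetD selection j ' ' = '1' then combo ++ [PySem.List.pyGetD rotors j 0]
          else combo) []
        if combo.length ≠ 3 then possible else possible ++ [combo]) acc i
      = (fun possible i =>
          if (selChars (bitstr rotors.length i.toNat) rotors).length = 3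
          then possible ++ [selChars (bitstr rotors.length i.toNat) rotors] else possible) acc i := by
    intro acc i hi
    rcases PySem.List.mem_pyRange_one.mp hi with ⟨hi7, hilt⟩
    have hm : i.toNat < 2 ^ rotors.length := by
      rw [pow_cast] at hilt; omega
    have hcast : (i : Int) = ((i.toNat : Nat) : Int) := by omega
    dsimp only
    conv_lhs => rw [hcast]
    rw [pad_get_binary rotors.length i.toNat hm]
    rw [inner_loop_eq (bitstr rotors.length i.toNat) rotors
      (by rw [bitstr, List.length_reverse, lbits_len])]
    simp only [ne_eq, ite_not]
  rw [PySem.List.foldl_congr_mem _ _ _ _ hb]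
  have key : List.foldl (fun possible i =>
        if (selChars (bitstr rotors.length i.toNat) rotors).length = 3
        then possible ++ [selChars (bitstr rotors.length i.toNat) rotors] else possible)
      [] (PySem.List.pyRange 7 ((2 : Int) ^ rotors.length) 1)
      = [] ++ ((PySem.List.pyRange 7 ((2 : Int) ^ rotors.length) 1).filter
          (fun i => decide ((selChars (bitstr rotors.length i.toNat) rotors).length = 3))).map
          (fun i => selChars (bitstr rotors.length i.toNat) rotors) :=
    PySem.List.foldl_append_ite _ _ _ _
  rw [key, List.nil_append, PySem.List.pyRange_one]
  have hA1 : ((2 : Int) ^ rotors.length - 7).toNat = 2 ^ rotors.length - 7 := by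
    rw [pow_cast]; omega
  rw [hA1, List.filter_map]
  have hA2 : (List.range (2 ^ rotors.length - 7)).filter
        ((fun i => decide ((selChars (bitstr rotors.length i.toNat) rotors).length = 3))
          ∘ (fun k => (7 : Int) + ↑k))
      = (List.range (2 ^ rotors.length - 7)).filter (fun k => decide (popcnt (7 + k) = 3)) := by
    apply List.filter_congr
    intro k hk
    have hk' : k < 2 ^ rotors.length - 7 := List.mem_range.mp hk
    have e : ((7 : Int) + (k : Int)).toNat = 7 + k := by omega
    simp only [Function.comp, e]
    rw [sel_length rotors (7 + k) (by omega)]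
  rw [hA2, List.map_map]
  apply List.map_congr_left
  intro k hk
  have hk' : k < 2 ^ rotors.length - 7 := List.mem_range.mp (List.mem_filter.mp hk).1
  have e : ((7 : Int) + (k : Int)).toNat = 7 + k := by omega
  simp only [Function.comp, e]

theorem B_norm (rotors : List Int) (h3 : ¬ rotors.length < 3) :
    get_rotors_alt rotors
      = ((List.range (2 ^ rotors.length - 7)).filter
          (fun k => decide (popcnt (7 + k) = 3))).map
          (fun k => selChars (bitstr rotors.length (7 + k)) rotors) := by
  have hn : 3 ≤ rotors.length := by omega
  have hN8 : 8 ≤ 2 ^ rotors.length := by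
    calc (8 : Nat) = 2 ^ 3 := rfl
      _ ≤ 2 ^ rotors.length := Nat.pow_le_pow_right (by omega) hn
  rw [get_rotors_alt, if_neg h3, combosB_eq rotors 3, ← filter_range_popcnt rotors.length 3]
  rw [show List.range (2 ^ rotors.length)
        = List.range 7 ++ (List.range (2 ^ rotors.length - 7)).map (fun x => 7 + x) from by
      rw [← List.range_add]; congr 1; omega]
  rw [List.filter_append, List.filter_map, List.map_append, List.map_map]
  have hB1 : (List.range 7).filter (fun m => decide (popcnt m = 3)) = [] := by
    apply List.filter_eq_nil_iff.mpr
    intro m hm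
    simp [popcnt_lt7 m (List.mem_range.mp hm)]
  rw [hB1, List.map_nil, List.nil_append]
  rfl

theorem get_rotors_spec : Claim_equal_get_rotors := by
  intro rotors _
  unfold Spec_get_rotors
  by_cases h3 : rotors.length < 3
  · rw [get_rotors, get_rotors_alt, if_pos h3, if_pos h3]
  · rw [A_norm rotors h3, B_norm rotors h3]
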